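-- pv_equiv track=rewrite | github.com/cafe-jun/codingTest-Algo | programmers/월간챌린지3/n2_배열자르기.py | solution
-- ===== SOURCE A (Python) =====
-- def solution(n, left, right):
--     answer = []
--     move = left
--     while move <= right:
--         cycle,rest = divmod(move,n)
--         for i in range(rest,n):
--             if move > right:
--                 break
--             if i <= (cycle):
--                 answer.append(cycle+1)
--             else:
--                 answer.append((cycle+1)+(i-cycle))
--             move += 1
--     return answer
-- ===== SOURCE B (Python) =====
-- def solution(n, left, right):
--     # single flat pass: element at flat index k is max(row, col)+1 = max(divmod(k, n))+1
--     return [max(divmod(k, n)) + 1 for k in range(left, right + 1)]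
-- ===== Notes on version B (the rewrite author's own statement) =====
-- stated objective: simpler
-- what changed: Replaces the nested while/for block-and-column traversal with its running move counter and break guards by one flat pass over range(left, right+1) computing each element with the closed form max(divmod(k, n)) + 1.
import Mathlib
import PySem

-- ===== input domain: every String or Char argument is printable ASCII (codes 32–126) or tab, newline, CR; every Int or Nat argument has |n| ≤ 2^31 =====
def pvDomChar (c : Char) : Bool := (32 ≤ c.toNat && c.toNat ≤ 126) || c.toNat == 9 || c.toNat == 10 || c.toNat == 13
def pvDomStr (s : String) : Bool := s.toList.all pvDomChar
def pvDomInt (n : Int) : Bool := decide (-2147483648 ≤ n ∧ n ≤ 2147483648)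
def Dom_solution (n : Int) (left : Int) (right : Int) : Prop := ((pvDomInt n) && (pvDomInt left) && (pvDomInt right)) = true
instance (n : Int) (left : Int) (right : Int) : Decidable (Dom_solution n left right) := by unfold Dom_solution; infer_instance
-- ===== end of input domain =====

-- B replaces A's nested while/for block traversal (running `move` counter, break guards)
-- by a single flat map over the index range with the closed form max(k//n, k%n)+1; same cost.

-- ===== PORT A =====
-- inner `for i in range(rest, n)` loop: state (answer, move), `break` when move > right
-- (Python's range is lazy, so the loop walks the index i directly, as the for-loop does)
def solInner (n right cycle : Int) (i : Int) (ans : List Int) (move : Int) : List Int × Int :=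
  if _h : i < n then
    if move > right then (ans, move)
    else
      solInner n right cycle (i + 1)
        (ans ++ [if i ≤ cycle then cycle + 1 else (cycle + 1) + (i - cycle)]) (move + 1)
  else (ans, move)
termination_by (n - i).toNat
decreasing_by omega

-- outer `while move <= right` loop; fuel bounds the number of iterations (each one
-- advances `move` by at least 1 when n ≥ 1, which Pre_ guarantees)
def solOuter (n right : Int) : Nat → Int → List Int → List Int
  | 0, _, ans => ans
  | fuel + 1, move, ans =>
      if move ≤ right then
        let cycle := PySem.Int.floordiv move n
        let rest := PySem.Int.mod move n
        let p := solInner n right cycle rest ans move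
        solOuter n right fuel p.2 p.1
      else ans

def solution (n : Int) (left : Int) (right : Int) : List Int :=
  solOuter n right ((right - left).toNat + 1) left []

-- ===== PORT B =====
def solution_alt (n : Int) (left : Int) (right : Int) : List Int :=
  (PySem.List.pyRange left (right + 1) 1).map
    (fun k => max (PySem.Int.floordiv k n) (PySem.Int.mod k n) + 1)

-- ===== PRECONDITION & SPEC =====
-- Pre_ excludes n ≤ 0 with left ≤ right: there the Python A raises ZeroDivisionError (n = 0)
-- or loops forever (n < 0, the inner range is empty so `move` never advances).
def Pre_solution (n : Int) (left : Int) (right : Int) : Prop := 1 ≤ n ∨ right < left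
instance (n : Int) (left : Int) (right : Int) : Decidable (Pre_solution n left right) := by
  unfold Pre_solution; infer_instance

def pvWitness_solution : Int × Int × Int := (3, 2, 5)

def Spec_solution (n : Int) (left : Int) (right : Int) (out : List Int) : Prop := out = solution_alt n left right
instance (n : Int) (left : Int) (right : Int) (out : List Int) : Decidable (Spec_solution n left right out) := by unfold Spec_solution; infer_instance

-- ===== CLAIM (what is proved, stated in full; the proofs are below) =====
def Claim_equal_solution : Prop := ∀ (n : Int) (left : Int) (right : Int), Dom_solution n left right → Pre_solution n left right → Spec_solution n left right (solution n left right)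

-- ===== LEMMAS AND PROOFS =====

-- the per-index closed form B uses
def pvF (n k : Int) : Int := max (PySem.Int.floordiv k n) (PySem.Int.mod k n) + 1

lemma pvF_eq (n cycle i : Int) (hn : 1 ≤ n) (hi0 : 0 ≤ i) (hin : i < n) :
    pvF n (cycle * n + i) = max cycle i + 1 := by
  have hfd : PySem.Int.floordiv (cycle * n + i) n = cycle := by
    rw [PySem.Int.floordiv_eq_iff_of_pos (by omega)]
    constructor <;> nlinarith
  have hmod : PySem.Int.mod (cycle * n + i) n = i := by
    have := PySem.Int.floordiv_mul_add_mod (cycle * n + i) n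
    rw [hfd] at this; omega
  simp [pvF, hfd, hmod]

lemma inner_spec (n right cycle : Int) (hn : 1 ≤ n) :
    ∀ (i move : Int) (ans : List Int), 0 ≤ i → i < n → move = cycle * n + i →
      move ≤ right + 1 →
      solInner n right cycle i ans move =
        (ans ++ (PySem.List.pyRange move (min (cycle * n + n) (right + 1)) 1).map (pvF n),
         min (cycle * n + n) (right + 1)) := by
  intro i move ans hi0 hin hmv hmr
  induction h : (n - i).toNat generalizing i move ans with
  | zero => omega
  | succ m ih =>
    rw [solInner]
    by_cases hbr : move > right
    · have hmove : move = right + 1 := by omega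
      have hlt : right + 1 < cycle * n + n := by omega
      simp [hin, hmove]
      omega
    · have hval : (if i ≤ cycle then cycle + 1 else (cycle + 1) + (i - cycle)) = pvF n move := by
        rw [hmv, pvF_eq n cycle i hn hi0 hin]
        split_ifs <;> omega
      simp only [hin, dite_true, hbr, if_false, hval]
      by_cases hlast : i + 1 < n
      · rw [ih (i + 1) (move + 1) (ans ++ [pvF n move]) (by omega) hlast (by omega) (by omega) (by omega)]
        have hsplit : PySem.List.pyRange move (min (cycle * n + n) (right + 1)) 1 =
            move :: PySem.List.pyRange (move + 1) (min (cycle * n + n) (right + 1)) 1 :=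
          PySem.List.pyRange_one_cons (by omega)
        rw [hsplit]
        simp
      · have hend : i + 1 = n := by omega
        have hmin : min (cycle * n + n) (right + 1) = move + 1 := by omega
        rw [solInner]
        simp [show ¬ (i + 1 < n) by omega, hmin]

lemma outer_spec (n right : Int) (hn : 1 ≤ n) :
    ∀ (fuel : Nat) (move : Int) (ans : List Int), (right + 1 - move).toNat ≤ fuel →
      solOuter n right fuel move ans =
        ans ++ (PySem.List.pyRange move (right + 1) 1).map (pvF n) := by
  intro fuel
  induction fuel with
  | zero =>
    intro move ans hf
    rw [PySem.List.pyRange_one_eq_nil (by omega)]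
    simp [solOuter]
  | succ m ih =>
    intro move ans hf
    by_cases hmr : move ≤ right
    · have hrest0 : 0 ≤ PySem.Int.mod move n := PySem.Int.mod_nonneg move (by omega)
      have hrestn : PySem.Int.mod move n < n := PySem.Int.mod_lt move (by omega)
      have hdm := PySem.Int.floordiv_mul_add_mod move n
      simp only [solOuter, hmr, if_true]
      rw [inner_spec n right (PySem.Int.floordiv move n) hn (PySem.Int.mod move n) move ans
            hrest0 hrestn (by omega) (by omega)]
      have hlt : move < PySem.Int.floordiv move n * n + n := by omega
      rw [ih _ _ (by omega)]
      rw [PySem.List.pyRange_one_append move (min (PySem.Int.floordiv move n * n + n) (right + 1))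
            (right + 1) (by omega) (by omega)]
      simp
    · simp only [solOuter, hmr, if_false]
      rw [PySem.List.pyRange_one_eq_nil (by omega)]
      simp

-- ===== VERDICT (by name: the statement is the Claim_ definition above) =====
theorem solution_spec : Claim_equal_solution := by
  intro n left right _ hpre
  unfold Spec_solution solution solution_alt
  rcases hpre with hn | hrl
  · rw [outer_spec n right hn _ left [] (by omega)]
    simp [pvF]
  · rw [PySem.List.pyRange_one_eq_nil (by omega)]
    simp [solOuter, show ¬ left ≤ right by omega]
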